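-- pv_equiv track=rewrite | github.com/JohnQue/BOJ_Algorithm_Python | 쿠팡3_1번.py | solution
-- ===== SOURCE A (Python) =====
-- def solution(k, score):
--     arr = [0] * (len(score))
--     obj = {}
--     for i in range(len(score)-1):
--         arr[i+1] = score[i] - score[i+1]
--         if obj.get(arr[i+1]) is None:
--             obj[arr[i+1]] = 1
--         elif obj.get(arr[i+1]):
--             obj[arr[i+1]] += 1
--     for key in obj.keys():
--         if obj[key] >= k:
--             obj[key] = 0
--
--     answer = 0
--     for value in obj.values():
--         if value:
--             answer += value
--
--     return answer - 1
-- ===== SOURCE B (Python) =====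
-- def solution(k, score):
--     diffs = sorted(score[i] - score[i + 1] for i in range(len(score) - 1))
--
--     def runs(d):
--         if not d:
--             return 0
--         j = 1
--         while j < len(d) and d[j] == d[0]:
--             j += 1
--         return (j if j < k else 0) + runs(d[j:])
--
--     return runs(diffs) - 1
-- ===== Notes on version B (the rewrite author's own statement) =====
-- stated objective: alternative
-- what changed: Replaces A's incremental dict tally plus zeroing pass plus truthiness-filtered value sum by sorting the consecutive differences and summing run lengths < k in one pass over the sorted list.
import Mathlib
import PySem

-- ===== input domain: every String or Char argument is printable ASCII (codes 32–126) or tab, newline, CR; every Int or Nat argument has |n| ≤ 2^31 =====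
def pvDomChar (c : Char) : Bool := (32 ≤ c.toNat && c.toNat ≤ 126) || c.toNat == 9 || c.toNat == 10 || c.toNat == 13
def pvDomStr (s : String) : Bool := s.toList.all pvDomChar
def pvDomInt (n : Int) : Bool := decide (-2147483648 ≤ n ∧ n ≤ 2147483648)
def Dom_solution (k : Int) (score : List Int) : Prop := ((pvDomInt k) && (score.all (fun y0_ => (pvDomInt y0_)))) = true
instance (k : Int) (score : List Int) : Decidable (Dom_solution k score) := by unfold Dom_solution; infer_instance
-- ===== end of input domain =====

-- B sorts the consecutive differences and sums run lengths < k in one pass, instead of A's dict tally + zeroing pass + filtered value sum; return values proved equal.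

-- ===== PORT A =====
-- the body of A's first loop acting on obj: if obj.get(d) is None: obj[d]=1; elif obj.get(d): obj[d]+=1
def aTally (o : PySem.Dict Int Int) (d : Int) : PySem.Dict Int Int :=
  if o.get? d = none then o.insert d 1
  else if o.getD d 0 ≠ 0 then o.insert d (o.getD d 0 + 1)
  else o

def solution (k : Int) (score : List Int) : Int :=
  let n := PySem.List.len score
  let st := (PySem.List.pyRange 0 (n - 1)).foldl
    (fun (st : List Int × PySem.Dict Int Int) i =>
      let d := PySem.List.pyGetD score i 0 - PySem.List.pyGetD score (i + 1) 0
      (st.1.set (i + 1).toNat d, aTally st.2 d))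
    (List.replicate n.toNat (0 : Int), PySem.Dict.empty)
  let obj := st.2.keys.foldl
    (fun (o : PySem.Dict Int Int) key => if o.getD key 0 ≥ k then o.insert key 0 else o) st.2
  let answer := obj.values.foldl (fun a v => if v ≠ 0 then a + v else a) (0 : Int)
  answer - 1

-- ===== PORT B =====
-- the recursive helper `runs` of Source B: leading run length j, add it when j < k, recurse on d[j:]
def bRuns (k : Int) : List Int → Int
  | [] => 0
  | x :: rest =>
    let j : Int := 1 + (rest.takeWhile (fun y => y == x)).length
    (if j < k then j else 0) + bRuns k (rest.dropWhile (fun y => y == x))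
termination_by l => l.length
decreasing_by
  simp only [List.length_cons]
  exact Nat.lt_succ_of_le (List.length_dropWhile_le _ _)

def solution_alt (k : Int) (score : List Int) : Int :=
  let diffs := PySem.List.sorted
    ((PySem.List.pyRange 0 (PySem.List.len score - 1)).map
      (fun i => PySem.List.pyGetD score i 0 - PySem.List.pyGetD score (i + 1) 0))
    (fun x => x) false
  bRuns k diffs - 1

-- ===== PRECONDITION & SPEC =====
def Spec_solution (k : Int) (score : List Int) (out : Int) : Prop := out = solution_alt k score
instance (k : Int) (score : List Int) (out : Int) : Decidable (Spec_solution k score out) := by unfold Spec_solution; infer_instance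

-- ===== CLAIM (what is proved, stated in full; the proofs are below) =====
def Claim_equal_solution : Prop := ∀ (k : Int) (score : List Int), Dom_solution k score → Spec_solution k score (solution k score)

-- ===== LEMMAS AND PROOFS =====

-- consecutive differences of score, as one list
def diffsOf (xs : List Int) : List Int := (xs.zip xs.tail).map (fun p => p.1 - p.2)

lemma map_pyRange_diffs (xs : List Int) :
    (PySem.List.pyRange 0 (PySem.List.len xs - 1)).map
      (fun i => PySem.List.pyGetD xs i 0 - PySem.List.pyGetD xs (i + 1) 0) = diffsOf xs := by
  cases xs with
  | nil => rfl
  | cons a t =>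
    have hlen : PySem.List.len (a :: t) - 1 = ((t.length : Nat) : Int) := by
      simp [PySem.List.len]
    rw [hlen, PySem.List.pyRange_zero_natCast, List.map_map]
    apply List.ext_getElem
    · simp [diffsOf]
    · intro i h1 h2
      have hi : i < t.length := by simpa using h1
      simp only [List.getElem_map, List.getElem_range, Function.comp_apply, diffsOf,
        List.getElem_zip, List.tail_cons]
      rw [PySem.List.pyGetD_eq_getElem _ _ (by positivity) (by exact_mod_cast by simpa using Nat.lt_succ_of_lt hi),
          PySem.List.pyGetD_eq_getElem _ _ (by positivity) (by simp only [List.length_cons]; push_cast; omega)]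
      simp only [Int.toNat_natCast]
      have h3 : ((i : Int) + 1).toNat = i + 1 := by omega
      simp [h3]

-- A zeroes a tallied count that reaches k; both pipelines sum zf over the distinct counts
def zf (k v : Int) : Int := if v ≥ k then 0 else v

lemma snd_foldl_pair {α β γ : Type} (l : List γ) (g : α → γ → α) (h : β → γ → β) (a : α) (b : β) :
    (l.foldl (fun (st : α × β) i => (g st.1 i, h st.2 i)) (a, b)).2 = l.foldl h b := by
  induction l generalizing a b with
  | nil => rfl
  | cons x t ih => exact ih _ _

lemma foldl_truthy_sum (l : List Int) (a : Int) :
    l.foldl (fun acc v => if v ≠ 0 then acc + v else acc) a = a + l.sum := by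
  induction l generalizing a with
  | nil => simp
  | cons x t ih =>
    simp only [List.foldl_cons, ih, List.sum_cons]
    by_cases hx : x = 0
    · simp [hx]
    · simp [hx]; ring

lemma get?_getD_of_contains (d : PySem.Dict Int Int) (x : Int) (h : d.contains x = true) :
    d.get? x = some (d.getD x 0) := by
  simp only [PySem.Dict.get?, PySem.Dict.getD]
  cases h2 : d.items.find? (fun p => p.1 == x) with
  | none =>
    exfalso
    rw [List.find?_eq_none] at h2
    simp only [PySem.Dict.contains, List.any_eq_true] at h
    obtain ⟨p, hp, hb⟩ := h
    exact h2 p hp hb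
  | some p => simp [PySem.Dict.get?, h2]

lemma get?_eq_none_of_not_contains (d : PySem.Dict Int Int) (x : Int) (h : d.contains x = false) :
    d.get? x = none := by
  simp only [PySem.Dict.get?, Option.map_eq_none_iff, List.find?_eq_none]
  intro p hp hb
  simp only [PySem.Dict.contains, List.any_eq_false] at h
  exact absurd hb (h p hp)

lemma aTally_counter (ds : List Int) (x : Int) :
    aTally (PySem.Dict.counter ds) x
      = (PySem.Dict.counter ds).insert x ((PySem.Dict.counter ds).getD x 0 + 1) := by
  by_cases hx : x ∈ ds
  · have hc : (PySem.Dict.counter ds).contains x = true := by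
      rw [PySem.Dict.contains_counter]; simpa using hx
    have hg := get?_getD_of_contains _ x hc
    have hcount : (PySem.Dict.counter ds).getD x 0 = (ds.count x : Int) := by
      simpa using PySem.Dict.getD_counter ds x
    have hpos : 0 < ds.count x := List.count_pos_iff.mpr hx
    rw [aTally, if_neg (by simp [hg]), if_pos (by rw [hcount]; exact_mod_cast Nat.pos_iff_ne_zero.mp hpos)]
  · have hc : (PySem.Dict.counter ds).contains x = false := by
      rw [PySem.Dict.contains_counter]; simpa using hx
    have hg := get?_eq_none_of_not_contains _ x hc
    have hcount : (PySem.Dict.counter ds).getD x 0 = 0 := by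
      rw [PySem.Dict.getD_counter, List.count_eq_zero_of_not_mem hx]
      rfl
    rw [aTally, if_pos (by simp [hg]), hcount]
    norm_num

lemma foldl_aTally (ds : List Int) :
    ds.foldl aTally PySem.Dict.empty = PySem.Dict.counter ds := by
  induction ds using List.reverseRecOn with
  | nil => rfl
  | append_singleton t x ih =>
    rw [List.foldl_append, List.foldl_cons, List.foldl_nil, ih]
    conv_rhs => rw [← PySem.Dict.foldl_insert_getD_add_one_eq_counter, List.foldl_append,
      List.foldl_cons, List.foldl_nil, PySem.Dict.foldl_insert_getD_add_one_eq_counter]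
    exact aTally_counter t x

lemma find?_eq_of_mem_of_nodup (items : List (Int × Int)) (hk : (items.map Prod.fst).Nodup)
    {p : Int × Int} (hp : p ∈ items) : items.find? (fun q => q.1 == p.1) = some p := by
  induction items with
  | nil => cases hp
  | cons q t ih =>
    rcases List.mem_cons.mp hp with rfl | hpt
    · simp [List.find?_cons_of_pos]
    · have hq : q.1 ≠ p.1 := by
        simp only [List.map_cons, List.nodup_cons] at hk
        intro he
        exact hk.1 (he ▸ List.mem_map_of_mem hpt)
      rw [List.find?_cons_of_neg (by simpa using hq)]
      exact ih (by simp only [List.map_cons, List.nodup_cons] at hk; exact hk.2) hpt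

lemma get?_eq_of_mem_of_nodup (d : PySem.Dict Int Int) (hk : d.keys.Nodup)
    {p : Int × Int} (hp : p ∈ d.items) : d.get? p.1 = some p.2 := by
  simp only [PySem.Dict.get?, find?_eq_of_mem_of_nodup d.items hk hp, Option.map_some]

lemma items_insert_of_contains (d : PySem.Dict Int Int) (key v : Int) (h : d.contains key = true) :
    (d.insert key v).items = d.items.map (fun p => if p.1 == key then (key, v) else p) := by
  simp [PySem.Dict.insert, h]

lemma keys_insert_of_contains (d : PySem.Dict Int Int) (key v : Int) (h : d.contains key = true) :
    (d.insert key v).keys = d.keys := by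
  simp only [PySem.Dict.keys, items_insert_of_contains d key v h, List.map_map]
  apply List.map_congr_left
  intro p _
  by_cases hb : p.1 = key <;> simp [hb]

lemma foldl_zero_items (k : Int) (ks : List Int) (d : PySem.Dict Int Int)
    (hnd : ks.Nodup) (hkeys : d.keys.Nodup) (hsub : ∀ x ∈ ks, x ∈ d.keys) :
    ((ks.foldl (fun (o : PySem.Dict Int Int) key => if o.getD key 0 ≥ k then o.insert key 0 else o) d)).items
      = d.items.map (fun p => if p.1 ∈ ks ∧ p.2 ≥ k then (p.1, 0) else p) := by
  induction ks generalizing d with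
  | nil => simp
  | cons key ks ih =>
    have hkey : key ∈ d.keys := hsub key (List.mem_cons_self)
    have hcont : d.contains key = true := by
      simp only [PySem.Dict.contains, List.any_eq_true]
      simp only [PySem.Dict.keys, List.mem_map] at hkey
      obtain ⟨p, hp, he⟩ := hkey
      exact ⟨p, hp, by simp [he]⟩
    have hknk : key ∉ ks := (List.nodup_cons.mp hnd).1
    have hndks : ks.Nodup := (List.nodup_cons.mp hnd).2
    rw [List.foldl_cons]
    by_cases hge : d.getD key 0 ≥ k
    · rw [if_pos hge]
      have hkeys' : (d.insert key 0).keys = d.keys := keys_insert_of_contains d key 0 hcont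
      rw [ih (d.insert key 0) hndks (hkeys' ▸ hkeys)
          (fun x hx => hkeys' ▸ hsub x (List.mem_cons_of_mem _ hx)),
        items_insert_of_contains d key 0 hcont, List.map_map]
      apply List.map_congr_left
      intro p hp
      simp only [Function.comp_apply]
      by_cases hpk : p.1 = key
      · have hval : d.getD key 0 = p.2 := by
          have := get?_eq_of_mem_of_nodup d hkeys hp
          simp [PySem.Dict.getD, hpk ▸ this]
        have h2 : k ≤ p.2 := by omega
        simp [hpk, h2]
      · simp [hpk]
    · rw [if_neg hge, ih d hndks hkeys (fun x hx => hsub x (List.mem_cons_of_mem _ hx))]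
      apply List.map_congr_left
      intro p hp
      by_cases hpk : p.1 = key
      · have hval : d.getD key 0 = p.2 := by
          have := get?_eq_of_mem_of_nodup d hkeys hp
          simp [PySem.Dict.getD, hpk ▸ this]
        have h2 : ¬ (k ≤ p.2) := by omega
        simp [hpk, h2, hknk]
      · simp [hpk]

lemma solution_eq_sum (k : Int) (score : List Int) :
    solution k score
      = ((PySem.Set.ofList (diffsOf score)).map
          (fun v => zf k ((diffsOf score).count v : Int))).sum - 1 := by
  have hobj : ((PySem.List.pyRange 0 (PySem.List.len score - 1)).foldl
      (fun (st : List Int × PySem.Dict Int Int) i =>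
        (st.1.set (i + 1).toNat (PySem.List.pyGetD score i 0 - PySem.List.pyGetD score (i + 1) 0),
         aTally st.2 (PySem.List.pyGetD score i 0 - PySem.List.pyGetD score (i + 1) 0)))
      (List.replicate (PySem.List.len score).toNat (0 : Int), PySem.Dict.empty)).2
      = PySem.Dict.counter (diffsOf score) := by
    rw [snd_foldl_pair _
        (fun (arr : List Int) (i : Int) => arr.set (i + 1).toNat (PySem.List.pyGetD score i 0 - PySem.List.pyGetD score (i + 1) 0))
        (fun (o : PySem.Dict Int Int) (i : Int) => aTally o (PySem.List.pyGetD score i 0 - PySem.List.pyGetD score (i + 1) 0)),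
      show (List.foldl (fun o i => aTally o (PySem.List.pyGetD score i 0 - PySem.List.pyGetD score (i + 1) 0)) PySem.Dict.empty (PySem.List.pyRange 0 (PySem.List.len score - 1)))
        = List.foldl aTally PySem.Dict.empty ((PySem.List.pyRange 0 (PySem.List.len score - 1)).map (fun i => PySem.List.pyGetD score i 0 - PySem.List.pyGetD score (i + 1) 0)) from List.foldl_map.symm,
      map_pyRange_diffs, foldl_aTally]
  show ((((PySem.List.pyRange 0 (PySem.List.len score - 1)).foldl
      (fun (st : List Int × PySem.Dict Int Int) i =>
        (st.1.set (i + 1).toNat (PySem.List.pyGetD score i 0 - PySem.List.pyGetD score (i + 1) 0),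
         aTally st.2 (PySem.List.pyGetD score i 0 - PySem.List.pyGetD score (i + 1) 0)))
      (List.replicate (PySem.List.len score).toNat (0 : Int), PySem.Dict.empty)).2.keys.foldl
        (fun (o : PySem.Dict Int Int) key => if o.getD key 0 ≥ k then o.insert key 0 else o)
        ((PySem.List.pyRange 0 (PySem.List.len score - 1)).foldl
      (fun (st : List Int × PySem.Dict Int Int) i =>
        (st.1.set (i + 1).toNat (PySem.List.pyGetD score i 0 - PySem.List.pyGetD score (i + 1) 0),
         aTally st.2 (PySem.List.pyGetD score i 0 - PySem.List.pyGetD score (i + 1) 0)))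
      (List.replicate (PySem.List.len score).toNat (0 : Int), PySem.Dict.empty)).2).values.foldl
        (fun a v => if v ≠ 0 then a + v else a) (0 : Int)) - 1
    = ((PySem.Set.ofList (diffsOf score)).map
          (fun v => zf k ((diffsOf score).count v : Int))).sum - 1
  rw [hobj]
  set ds := diffsOf score with hds
  congr 1
  rw [foldl_truthy_sum]
  have hitems := foldl_zero_items k (PySem.Dict.counter ds).keys (PySem.Dict.counter ds)
    (PySem.Dict.nodup_keys_counter _) (PySem.Dict.nodup_keys_counter _) (fun x hx => hx)
  simp only [PySem.Dict.values, hitems, List.map_map, zero_add]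
  simp only [PySem.Dict.items_counter, List.map_map]
  apply congrArg
  apply List.map_congr_left
  intro v hv
  simp only [Function.comp_apply]
  by_cases hge : ((ds.count v : Int)) ≥ k
  · rw [if_pos ⟨by rw [PySem.Dict.keys_counter]; exact hv, hge⟩]
    simp [zf, hge]
  · rw [if_neg (by rintro ⟨_, h2⟩; exact hge h2)]
    simp [zf, hge]

lemma bRuns_sorted (k : Int) (n : Nat) : ∀ (l : List Int), l.length ≤ n → l.Pairwise (· ≤ ·) →
    bRuns k l = ((PySem.List.dedup l).map (fun v => zf k (l.count v : Int))).sum := by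
  induction n with
  | zero =>
    intro l hl _
    have : l = [] := List.eq_nil_of_length_eq_zero (Nat.le_zero.mp hl)
    subst this
    simp [bRuns]
  | succ n ih =>
    intro l hl hs
    cases l with
    | nil => simp [bRuns]
    | cons x rest =>
      have htx : ∀ y ∈ rest.takeWhile (fun y => y == x), y = x := by
        intro y hy
        simpa using List.mem_takeWhile_imp hy
      have hrest : rest.takeWhile (fun y => y == x) ++ rest.dropWhile (fun y => y == x) = rest :=
        List.takeWhile_append_dropWhile
      have hxle : ∀ y ∈ rest, x ≤ y := (List.pairwise_cons.mp hs).1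
      have hrs : rest.Pairwise (· ≤ ·) := (List.pairwise_cons.mp hs).2
      have hrp : (rest.dropWhile (fun y => y == x)).Pairwise (· ≤ ·) :=
        List.Pairwise.sublist (List.dropWhile_sublist _) hrs
      have hxr : ∀ z ∈ rest.dropWhile (fun y => y == x), x < z := by
        cases hr0 : rest.dropWhile (fun y => y == x) with
        | nil => intro z hz; simp at hz
        | cons y r' =>
          have hyne : ¬ (y = x) := by
            have := List.head?_dropWhile_not (fun y => y == x) rest
            rw [hr0] at this
            simpa using this
          have hymem : y ∈ rest := (List.dropWhile_sublist _).mem (by rw [hr0]; exact List.mem_cons_self)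
          have hxy : x < y := lt_of_le_of_ne (hxle y hymem) (Ne.symm hyne)
          intro z hz
          rcases List.mem_cons.mp hz with rfl | hz'
          · exact hxy
          · have : y ≤ z := by
              rw [hr0] at hrp
              exact (List.pairwise_cons.mp hrp).1 z hz'
            exact lt_of_lt_of_le hxy this
      have hxnr : x ∉ rest.dropWhile (fun y => y == x) := fun hx => lt_irrefl x (hxr x hx)
      have hcrest : rest.count x = (rest.takeWhile (fun y => y == x)).length := by
        conv_lhs => rw [← hrest]
        rw [List.count_append, List.count_eq_length.mpr (fun y hy => (htx y hy).symm),
          List.count_eq_zero.mpr hxnr]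
        omega
      have hcx : (x :: rest).count x = 1 + (rest.takeWhile (fun y => y == x)).length := by
        rw [List.count_cons_self, hcrest]
        omega
      have hcv : ∀ v ∈ rest.dropWhile (fun y => y == x),
          (x :: rest).count v = (rest.dropWhile (fun y => y == x)).count v := by
        intro v hv
        have hvx : v ≠ x := fun he => lt_irrefl x (he ▸ hxr v hv)
        have hcr : rest.count v = (rest.dropWhile (fun y => y == x)).count v := by
          conv_lhs => rw [← hrest]
          rw [List.count_append, List.count_eq_zero.mpr (fun hvt => hvx (htx v hvt))]
          omega
        have hne : (x == v) = false := beq_eq_false_iff_ne.mpr (fun he => hvx he.symm)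
        rw [List.count_cons, hcr]
        simp [hne]
      have hnod2 : (x :: PySem.List.dedup (rest.dropWhile (fun y => y == x))).Nodup := by
        rw [List.nodup_cons]
        exact ⟨fun hx => hxnr ((PySem.List.mem_dedup _ _).mp hx), PySem.List.nodup_dedup _⟩
      have hperm : (PySem.List.dedup (x :: rest)).Perm
          (x :: PySem.List.dedup (rest.dropWhile (fun y => y == x))) := by
        rw [List.perm_ext_iff_of_nodup (PySem.List.nodup_dedup _) hnod2]
        intro a
        have hmemr : a ∈ rest ↔ (a ∈ rest.takeWhile (fun y => y == x) ∨ a ∈ rest.dropWhile (fun y => y == x)) := by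
          conv_lhs => rw [← hrest]
          exact List.mem_append
        rw [PySem.List.mem_dedup, List.mem_cons, List.mem_cons, PySem.List.mem_dedup]
        constructor
        · rintro (rfl | ha)
          · exact Or.inl rfl
          · rcases hmemr.mp ha with hat | har
            · exact Or.inl (htx a hat)
            · exact Or.inr har
        · rintro (rfl | har)
          · exact Or.inl rfl
          · exact Or.inr (hmemr.mpr (Or.inr har))
      have hlen : (rest.dropWhile (fun y => y == x)).length ≤ n := by
        have h1 := List.length_dropWhile_le (fun y => y == x) rest
        simp only [List.length_cons] at hl
        omega
      rw [bRuns]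
      rw [ih _ hlen hrp, (hperm.map _).sum_eq, List.map_cons, List.sum_cons]
      have hmap : (PySem.List.dedup (rest.dropWhile (fun y => y == x))).map
            (fun v => zf k (((x :: rest).count v : Int)))
          = (PySem.List.dedup (rest.dropWhile (fun y => y == x))).map
            (fun v => zf k (((rest.dropWhile (fun y => y == x)).count v : Int))) := by
        apply List.map_congr_left
        intro v hv
        rw [hcv v ((PySem.List.mem_dedup _ _).mp hv)]
      rw [hmap, hcx]
      have : (if (1 + ((rest.takeWhile (fun y => y == x)).length : Int)) < k
            then (1 + ((rest.takeWhile (fun y => y == x)).length : Int)) else 0)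
          = zf k ((1 + (rest.takeWhile (fun y => y == x)).length : Nat) : Int) := by
        unfold zf
        push_cast
        split_ifs <;> omega
      rw [this]

lemma solution_alt_eq_sum (k : Int) (score : List Int) :
    solution_alt k score
      = ((PySem.List.dedup (PySem.List.sorted (diffsOf score) (fun x => x) false)).map
          (fun v => zf k ((diffsOf score).count v : Int))).sum - 1 := by
  show bRuns k (PySem.List.sorted
      ((PySem.List.pyRange 0 (PySem.List.len score - 1)).map
        (fun i => PySem.List.pyGetD score i 0 - PySem.List.pyGetD score (i + 1) 0))
      (fun x => x) false) - 1 = _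
  rw [map_pyRange_diffs]
  rw [bRuns_sorted k (PySem.List.sorted (diffsOf score) (fun x => x) false).length _ le_rfl
    (PySem.List.sorted_pairwise (diffsOf score) (fun x => x))]
  congr 1
  apply congrArg
  apply List.map_congr_left
  intro v _
  rw [(PySem.List.sorted_perm (diffsOf score) (fun x => x) false).count_eq]

-- ===== VERDICT (by name: the statement is the Claim_ definition above) =====
theorem solution_spec : Claim_equal_solution := by
  intro k score _
  unfold Spec_solution
  rw [solution_eq_sum, solution_alt_eq_sum]
  have hperm : (PySem.Set.ofList (diffsOf score)).Perm
      (PySem.List.dedup (PySem.List.sorted (diffsOf score) (fun x => x) false)) := by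
    rw [List.perm_ext_iff_of_nodup (PySem.Set.nodup_ofList _) (PySem.List.nodup_dedup _)]
    intro a
    rw [PySem.Set.mem_ofList, PySem.List.mem_dedup, PySem.List.mem_sorted]
  rw [(hperm.map _).sum_eq]
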